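-- pv_equiv track=rewrite | github.com/dzhao14/HackerRank_code | practice/algorithms/implementation/repeated_string.py | solution
-- ===== SOURCE A (Python) =====
-- def solution(s, n):
--     count = 0
--     l = len(s)
--     a = 0
--     for i in s:
--         if i == 'a':
--             a += 1
--     whole = n // l
--     count = whole * a
--     if n % l == 0:
--         return count
--     remain = n - (whole * l)
--     for i in range(remain):
--         if s[i] == 'a':
--             count += 1
--     return count
-- ===== SOURCE B (Python) =====
-- def solution(s, n):
--     l = len(s)
--     return sum((n - i + l - 1) // l for i, c in enumerate(s) if c == 'a')
-- ===== Notes on version B (the rewrite author's own statement) =====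
-- stated objective: alternative
-- what changed: Replaces A's two loops plus division/remainder bookkeeping (count 'a' per copy, multiply by n//len, then rescan a prefix) by a single pass that sums one ceiling division (n - i + len - 1) // len per 'a' occurrence.
import Mathlib
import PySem

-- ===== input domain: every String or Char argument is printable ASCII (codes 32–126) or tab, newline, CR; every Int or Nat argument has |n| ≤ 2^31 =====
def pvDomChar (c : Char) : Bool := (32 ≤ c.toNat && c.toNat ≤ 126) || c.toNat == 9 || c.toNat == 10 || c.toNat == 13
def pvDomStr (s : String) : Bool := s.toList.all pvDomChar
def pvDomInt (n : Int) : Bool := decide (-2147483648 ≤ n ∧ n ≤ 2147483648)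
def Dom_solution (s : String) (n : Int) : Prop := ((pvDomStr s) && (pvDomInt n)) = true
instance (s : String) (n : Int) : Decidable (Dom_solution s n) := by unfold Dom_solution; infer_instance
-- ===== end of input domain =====

-- B replaces A's copies-times-count-plus-remainder-scan bookkeeping by one pass that sums a
-- ceiling division per 'a' occurrence (objective: alternative single-pass formulation).

-- ===== PORT A =====
def solution (s : String) (n : Int) : Int :=
  let cs := s.toList
  let l : Int := PySem.Str.len s
  let a : Int := cs.foldl (fun acc i => if i = 'a' then acc + 1 else acc) 0
  let whole := PySem.Int.floordiv n l
  let count := whole * a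
  if PySem.Int.mod n l = 0 then count
  else
    let remain := n - whole * l
    (PySem.List.pyRange 0 remain 1).foldl
      (fun acc i => if PySem.List.pyGetD cs i ' ' = 'a' then acc + 1 else acc) count

-- ===== PORT B =====
def solution_alt (s : String) (n : Int) : Int :=
  let l : Int := PySem.Str.len s
  (((PySem.List.enumerate s.toList 0).filter (fun p => p.2 = 'a')).map
      (fun p => PySem.Int.floordiv (n - p.1 + l - 1) l)).sum

-- ===== PRECONDITION & SPEC =====
-- Pre_ excludes only the empty string, on which A raises ZeroDivisionError (n // len(s)).
def Pre_solution (s : String) (n : Int) : Prop := s ≠ ""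
instance (s : String) (n : Int) : Decidable (Pre_solution s n) := by unfold Pre_solution; infer_instance
def pvWitness_solution : String × Int := ("aba", 10)

def Spec_solution (s : String) (n : Int) (out : Int) : Prop := out = solution_alt s n
instance (s : String) (n : Int) (out : Int) : Decidable (Spec_solution s n out) := by unfold Spec_solution; infer_instance

-- ===== CLAIM (what is proved, stated in full; the proofs are below) =====
def Claim_equal_solution : Prop := ∀ (s : String) (n : Int), Dom_solution s n → Pre_solution s n → Spec_solution s n (solution s n)

-- ===== LEMMAS AND PROOFS =====

-- Per-position identity behind B: the ceiling count of multiples hitting position i.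
theorem pv_key (n i l : Int) (hl : 0 < l) (hi0 : 0 ≤ i) (hil : i < l) :
    PySem.Int.floordiv (n - i + l - 1) l
      = PySem.Int.floordiv n l + (if i < PySem.Int.mod n l then 1 else 0) := by
  have h1 := PySem.Int.floordiv_mul_add_mod n l
  have h2 := PySem.Int.mod_nonneg n hl
  have h3 := PySem.Int.mod_lt n hl
  rw [PySem.Int.floordiv_eq_iff_of_pos hl]
  split_ifs with h <;> constructor <;> nlinarith

-- B's filtered sum over enumerate, with a running start index.
theorem pv_enumSum (n l : Int) (hl : 0 < l) :
    ∀ (cs : List Char) (i0 : Int), 0 ≤ i0 → i0 + cs.length ≤ l →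
    (((PySem.List.enumerate cs i0).filter (fun p => p.2 = 'a')).map
        (fun p => PySem.Int.floordiv (n - p.1 + l - 1) l)).sum
      = PySem.Int.floordiv n l * (cs.countP (· = 'a') : Int)
        + ((cs.take (PySem.Int.mod n l - i0).toNat).countP (· = 'a') : Int) := by
  intro cs
  induction cs with
  | nil => intro i0 _ _; simp [PySem.List.enumerate_nil]
  | cons c tl ih =>
    intro i0 h0 hlen
    have h2 := PySem.Int.mod_nonneg n hl
    have h3 := PySem.Int.mod_lt n hl
    have hi0l : i0 < l := by simp at hlen; omega
    have hih := ih (i0 + 1) (by omega) (by simp at hlen ⊢; omega)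
    rw [PySem.List.enumerate_cons]
    by_cases hc : c = 'a'
    · subst hc
      simp only [List.filter_cons, List.map_cons, List.sum_cons, decide_true, if_true,
        List.countP_cons]
      rw [pv_key n i0 l hl h0 hi0l, hih]
      by_cases hr : i0 < PySem.Int.mod n l
      · have ht : (PySem.Int.mod n l - i0).toNat = (PySem.Int.mod n l - (i0 + 1)).toNat + 1 := by
          omega
        rw [ht, List.take_succ_cons, List.countP_cons, if_pos hr]
        simp only [decide_true, if_true]
        push_cast
        ring
      · have ht : (PySem.Int.mod n l - i0).toNat = 0 := by omega
        have ht' : (PySem.Int.mod n l - (i0 + 1)).toNat = 0 := by omega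
        rw [ht, ht', if_neg hr]
        simp only [List.take_zero, List.countP_nil]
        push_cast
        ring
    · simp only [List.filter_cons, List.countP_cons, hc, decide_false, Bool.false_eq_true,
        if_false]
      rw [hih]
      congr 2
      by_cases hr : i0 < PySem.Int.mod n l
      · have ht : (PySem.Int.mod n l - i0).toNat = (PySem.Int.mod n l - (i0 + 1)).toNat + 1 := by
          omega
        rw [ht, List.take_succ_cons, List.countP_cons]
        simp [hc]
      · have ht : (PySem.Int.mod n l - i0).toNat = 0 := by omega
        have ht' : (PySem.Int.mod n l - (i0 + 1)).toNat = 0 := by omega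
        rw [ht, ht']
        simp

-- A's remainder loop over range(remain) counts the 'a's of the first r characters.
theorem pv_prefixLoop (cs : List Char) :
    ∀ (r : Nat) (init : Int), r ≤ cs.length →
    (PySem.List.pyRange 0 (r : Int) 1).foldl
        (fun acc i => if PySem.List.pyGetD cs i ' ' = 'a' then acc + 1 else acc) init
      = init + ((cs.take r).countP (· = 'a') : Int) := by
  intro r
  induction r with
  | zero =>
    intro init _
    rw [Nat.cast_zero, PySem.List.pyRange_one_eq_nil le_rfl]
    simp
  | succ k ih =>
    intro init hk
    have hcast : ((k + 1 : Nat) : Int) = (k : Int) + 1 := by push_cast; ring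
    rw [hcast, PySem.List.pyRange_one_succ_right (by positivity), List.foldl_append,
      ih init (by omega)]
    have hk' : k < cs.length := by omega
    simp only [List.foldl_cons, List.foldl_nil, PySem.List.pyGetD_natCast,
      List.getD_eq_getElem?_getD, List.getElem?_eq_getElem hk']
    rw [List.take_add_one, List.getElem?_eq_getElem hk']
    simp only [Option.toList_some, List.countP_append, List.countP_cons, List.countP_nil]
    by_cases hc : cs[k] = 'a' <;> simp [hc] <;> push_cast <;> ring

-- ===== VERDICT (by name: the statement is the Claim_ definition above) =====
theorem solution_spec : Claim_equal_solution := by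
  intro s n _ hpre
  simp only [Spec_solution, solution, solution_alt]
  have hne : s.toList ≠ [] := fun h => hpre (String.toList_eq_nil_iff.mp h)
  have hlen : 0 < s.toList.length := List.length_pos_iff.mpr hne
  have hl : PySem.Str.len s = (s.toList.length : Int) := PySem.Str.len_eq s
  have hlpos : (0 : Int) < PySem.Str.len s := by rw [hl]; exact_mod_cast hlen
  have hB := pv_enumSum n (PySem.Str.len s) hlpos s.toList 0 le_rfl (by rw [hl]; omega)
  simp only [sub_zero] at hB
  rw [hB, PySem.List.foldl_ite_add_one (fun x => x = 'a') s.toList 0]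
  have h2 := PySem.Int.mod_nonneg n hlpos
  have h3 := PySem.Int.mod_lt n hlpos
  by_cases hmod : PySem.Int.mod n (PySem.Str.len s) = 0
  · rw [if_pos hmod, hmod]
    simp
  · rw [if_neg hmod]
    have hremain : n - PySem.Int.floordiv n (PySem.Str.len s) * PySem.Str.len s
        = PySem.Int.mod n (PySem.Str.len s) := by
      have := PySem.Int.floordiv_mul_add_mod n (PySem.Str.len s)
      omega
    rw [hremain]
    have hrlt : (PySem.Int.mod n (PySem.Str.len s)).toNat ≤ s.toList.length := by omega
    have hcast : ((PySem.Int.mod n (PySem.Str.len s)).toNat : Int)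
        = PySem.Int.mod n (PySem.Str.len s) := by omega
    rw [← hcast, pv_prefixLoop s.toList _ _ hrlt]
    have hmax : ∀ m : Int, (max m 0).toNat = m.toNat := fun m => by omega
    simp [hmax]
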